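-- pv_equiv track=rewrite | github.com/kimghw/MailQueryWithMCP | modules/oauth/utilities/oauth_validator.py | validate_state_token
-- ===== SOURCE A (Python) =====
-- def validate_state_token(state: str) -> bool:
--     """
--     CSRF 상태 토큰의 유효성을 검증합니다.
--
--     Args:
--         state: 상태 토큰
--
--     Returns:
--         유효성 여부
--     """
--     if not state or not isinstance(state, str):
--         return False
--
--     # URL-safe base64 형식이어야 함
--     # 최소 32자 이상
--     if len(state) < 32:
--         return False
--
--     # URL-safe 문자만 포함
--     valid_chars = set(
--         "ABCDEFGHIJKLMNOPQRSTUVWXYZabcdefghijklmnopqrstuvwxyz0123456789-_"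
--     )
--     return all(c in valid_chars for c in state)
-- ===== SOURCE B (Python) =====
-- import re
--
-- _STATE_RE = re.compile(r'[A-Za-z0-9_-]{32,}')
--
-- def validate_state_token(state: str) -> bool:
--     if not isinstance(state, str) or not state:
--         return False
--     return _STATE_RE.fullmatch(state) is not None
-- ===== Notes on version B (the rewrite author's own statement) =====
-- stated objective: idiomatic
-- what changed: Replaces the explicit length check plus per-character set-membership loop with a single anchored regex fullmatch r'[A-Za-z0-9_-]{32,}' compiled once; no valid_chars set is built.
import Mathlib
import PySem

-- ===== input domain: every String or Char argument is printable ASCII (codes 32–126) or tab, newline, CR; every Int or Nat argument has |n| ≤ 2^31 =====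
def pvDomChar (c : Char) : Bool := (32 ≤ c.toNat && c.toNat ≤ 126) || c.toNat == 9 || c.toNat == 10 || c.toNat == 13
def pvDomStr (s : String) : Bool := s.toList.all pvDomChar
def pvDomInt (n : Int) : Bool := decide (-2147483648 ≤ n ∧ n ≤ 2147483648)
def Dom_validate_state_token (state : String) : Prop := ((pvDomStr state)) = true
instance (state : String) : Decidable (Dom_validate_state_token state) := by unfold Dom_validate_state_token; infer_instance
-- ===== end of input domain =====

-- B replaces A's length check plus per-character set-membership loop by one anchored
-- regex fullmatch over the class [A-Za-z0-9_-] with counted repetition {32,} (idiomatic).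

-- ===== PORT A =====
def validate_state_token (state : String) : Bool :=
  if state.toList = [] then false
  else if PySem.Str.len state < 32 then false
  else
    let valid_chars : PySem.Set Char :=
      PySem.Set.ofList "ABCDEFGHIJKLMNOPQRSTUVWXYZabcdefghijklmnopqrstuvwxyz0123456789-_".toList
    state.toList.all (fun c => valid_chars.contains c)

-- ===== PORT B =====
-- the regex character class [A-Za-z0-9_-]
def pvClassChar (c : Char) : Bool :=
  ('A' ≤ c && c ≤ 'Z') || ('a' ≤ c && c ≤ 'z') || ('0' ≤ c && c ≤ '9') || c == '_' || c == '-'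

-- fullmatch of [A-Za-z0-9_-]{32,} : DFA scan counting class characters, anchored at both ends
def pvFullmatch (cs : List Char) (count : Nat) : Bool :=
  match cs with
  | [] => decide (32 ≤ count)
  | c :: rest => if pvClassChar c then pvFullmatch rest (count + 1) else false

def validate_state_token_alt (state : String) : Bool :=
  if state.toList = [] then false
  else pvFullmatch state.toList 0

-- ===== PRECONDITION & SPEC =====
def Spec_validate_state_token (state : String) (out : Bool) : Prop := out = validate_state_token_alt state
instance (state : String) (out : Bool) : Decidable (Spec_validate_state_token state out) := by unfold Spec_validate_state_token; infer_instance

-- ===== CLAIM (what is proved, stated in full; the proofs are below) =====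
def Claim_equal_validate_state_token : Prop := ∀ (state : String), Dom_validate_state_token state → Spec_validate_state_token state (validate_state_token state)

-- ===== LEMMAS AND PROOFS =====

def pvValidList : List Char :=
  "ABCDEFGHIJKLMNOPQRSTUVWXYZabcdefghijklmnopqrstuvwxyz0123456789-_".toList

-- all-congruence restricted to members of the list
theorem pvAll_congr_mem {α : Type} (l : List α) (p q : α → Bool)
    (h : ∀ x ∈ l, p x = q x) : l.all p = l.all q := by
  induction l with
  | nil => rfl
  | cons a t ih =>
      simp only [List.all_cons, h a (by simp), ih (fun x hx => h x (by simp [hx]))]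

-- per-character agreement of A's set membership with B's regex character class,
-- for domain characters (codes ≤ 126)
set_option maxRecDepth 4000 in
theorem pvClass_eq_mem (c : Char) (h : pvDomChar c = true) :
    (PySem.Set.ofList pvValidList).contains c = pvClassChar c := by
  have h127 : c.toNat < 127 := by
    simp [pvDomChar] at h
    omega
  have aux : ∀ n, n < 127 → (PySem.Set.ofList pvValidList).contains (Char.ofNat n) = pvClassChar (Char.ofNat n) := by decide
  have := aux c.toNat h127
  rwa [Char.ofNat_toNat] at this

-- the DFA scan is the conjunction of the length bound and the per-character class check
theorem pvFullmatch_eq (cs : List Char) (k : Nat) :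
    pvFullmatch cs k = (decide (32 ≤ cs.length + k) && cs.all pvClassChar) := by
  induction cs generalizing k with
  | nil => simp [pvFullmatch]
  | cons c rest ih =>
      simp only [pvFullmatch, List.all_cons, List.length_cons]
      by_cases h : pvClassChar c = true
      · rw [if_pos h, ih, h]
        have : rest.length + (k + 1) = rest.length + 1 + k := by omega
        rw [this, Bool.true_and]
        rfl
      · rw [if_neg h]
        simp [Bool.eq_false_iff.mpr h]

-- ===== VERDICT (by name: the statement is the Claim_ definition above) =====
theorem validate_state_token_spec : Claim_equal_validate_state_token := by
  intro state hdom
  unfold Spec_validate_state_token validate_state_token validate_state_token_alt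
  by_cases he : state.toList = []
  · simp [he]
  · rw [if_neg he, if_neg he, pvFullmatch_eq]
    have hlen : PySem.Str.len state = (state.toList.length : Int) := by
      simp [PySem.Str.len_eq]
    have hl2 : state.length = state.toList.length := by simp
    by_cases h32 : state.toList.length < 32
    · rw [if_pos (by omega)]
      simp
      omega
    · rw [if_neg (by omega)]
      have : (decide (32 ≤ state.toList.length + 0)) = true := by
        simp; omega
      rw [this, Bool.true_and]
      apply pvAll_congr_mem
      intro c hc
      have hdc : pvDomChar c = true := by
        have := hdom
        unfold Dom_validate_state_token pvDomStr at this
        exact List.all_eq_true.mp this c hc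
      exact pvClass_eq_mem c hdc
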